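-- pv_equiv track=rewrite | github.com/atopile/atopile | src/atopile/lsp/lsp_server.py | _find_import_insert_line
-- ===== SOURCE A (Python) =====
-- def _find_import_insert_line(source: str) -> int:
--     """Find the line number where a new import should be inserted."""
--     lines = source.splitlines()
--     last_import_line = -1
--
--     for i, line in enumerate(lines):
--         stripped = line.strip()
--         # Check if this is an import line
--         if stripped.startswith("import ") or stripped.startswith("from "):
--             last_import_line = i
--
--     # If we found imports, insert after the last one
--     if last_import_line >= 0:
--         return last_import_line + 1
--
--     # Otherwise, insert at the beginning (after any comments/pragmas)
--     for i, line in enumerate(lines):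
--         stripped = line.strip()
--         if stripped and not stripped.startswith("#"):
--             return i
--
--     return 0
-- ===== SOURCE B (Python) =====
-- def _find_import_insert_line(source: str) -> int:
--     """Find the line number where a new import should be inserted."""
--     last_import = None
--     first_code = None
--     for i, line in enumerate(source.splitlines()):
--         s = line.strip()
--         if s.startswith("import ") or s.startswith("from "):
--             last_import = i
--         elif s and not s.startswith("#") and first_code is None:
--             first_code = i
--     if last_import is not None:
--         return last_import + 1
--     if first_code is not None:
--         return first_code
--     return 0
-- ===== Notes on version B (the rewrite author's own statement) =====
-- stated objective: alternative
-- what changed: Replaces A's two conditional passes (a full fold for the last import line, then a second scan with early return for the first code line) by a single pass that maintains both the last-import index and the first-code index in one accumulator pair.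
import Mathlib
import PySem

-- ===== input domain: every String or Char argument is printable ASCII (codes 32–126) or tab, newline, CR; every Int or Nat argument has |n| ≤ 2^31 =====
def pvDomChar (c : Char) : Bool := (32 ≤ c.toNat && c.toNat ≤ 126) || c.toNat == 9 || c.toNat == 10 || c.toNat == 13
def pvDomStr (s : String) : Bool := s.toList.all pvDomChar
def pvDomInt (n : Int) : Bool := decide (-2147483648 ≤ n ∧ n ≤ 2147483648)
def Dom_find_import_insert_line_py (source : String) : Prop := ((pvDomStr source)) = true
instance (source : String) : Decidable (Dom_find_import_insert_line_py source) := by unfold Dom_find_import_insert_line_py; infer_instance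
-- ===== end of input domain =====

-- B replaces A's two conditional passes over the lines (a full scan for the last import
-- line, then a second scan for the first code line) by a single pass tracking both
-- (objective: alternative decomposition, same asymptotic cost).

-- ===== PORT A =====
def find_import_insert_line_py (source : String) : Int :=
  let lines := PySem.Str.splitlines source
  let last_import_line : Int := (PySem.List.enumerate lines).foldl
    (fun acc p =>
      if PySem.Str.startswith (PySem.Str.strip p.2) "import "
          || PySem.Str.startswith (PySem.Str.strip p.2) "from " then
        p.1
      else acc) (-1)
  if last_import_line ≥ 0 then last_import_line + 1
  else
    -- second for-loop with early return ported as find?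
    match (PySem.List.enumerate lines).find? (fun p =>
        (PySem.Str.strip p.2 != "") && !PySem.Str.startswith (PySem.Str.strip p.2) "#") with
    | some p => p.1
    | none => 0

-- ===== PORT B =====
def find_import_insert_line_py_alt (source : String) : Int :=
  let st : Option Int × Option Int := (PySem.List.enumerate (PySem.Str.splitlines source)).foldl
    (fun acc p =>
      if PySem.Str.startswith (PySem.Str.strip p.2) "import "
          || PySem.Str.startswith (PySem.Str.strip p.2) "from " then
        (some p.1, acc.2)
      else if (PySem.Str.strip p.2 != "") && !PySem.Str.startswith (PySem.Str.strip p.2) "#"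
          && acc.2 == none then
        (acc.1, some p.1)
      else acc) (none, none)
  match st with
  | (some i, _) => i + 1
  | (none, some j) => j
  | (none, none) => 0

-- ===== PRECONDITION & SPEC =====
def Spec_find_import_insert_line_py (source : String) (out : Int) : Prop := out = find_import_insert_line_py_alt source
instance (source : String) (out : Int) : Decidable (Spec_find_import_insert_line_py source out) := by unfold Spec_find_import_insert_line_py; infer_instance

-- ===== CLAIM (what is proved, stated in full; the proofs are below) =====
def Claim_equal_find_import_insert_line_py : Prop := ∀ (source : String), Dom_find_import_insert_line_py source → Spec_find_import_insert_line_py source (find_import_insert_line_py source)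

-- ===== LEMMAS AND PROOFS =====

-- proof-only abbreviations (definitionally equal to the lambdas in the ports)
def pvImp (s : String) : Bool :=
  PySem.Str.startswith (PySem.Str.strip s) "import " || PySem.Str.startswith (PySem.Str.strip s) "from "
def pvCode (s : String) : Bool :=
  (PySem.Str.strip s != "") && !PySem.Str.startswith (PySem.Str.strip s) "#"
def pvOptInt (a : Option Int) : Int := match a with | some i => i | none => -1
def pvStepA (acc : Int) (p : Int × String) : Int := if pvImp p.2 then p.1 else acc
def pvStepO (a : Option Int) (p : Int × String) : Option Int := if pvImp p.2 then some p.1 else a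
def pvStepB (acc : Option Int × Option Int) (p : Int × String) : Option Int × Option Int :=
  if pvImp p.2 then (some p.1, acc.2)
  else if pvCode p.2 && acc.2 == none then (acc.1, some p.1)
  else acc
def pvGA (l : List (Int × String)) (acc : Int) : Int := l.foldl pvStepA acc
def pvGO (l : List (Int × String)) (a : Option Int) : Option Int := l.foldl pvStepO a
def pvGB (l : List (Int × String)) (st : Option Int × Option Int) : Option Int × Option Int :=
  l.foldl pvStepB st

lemma pvGA_cons (p : Int × String) (t : List (Int × String)) (acc : Int) :
    pvGA (p :: t) acc = pvGA t (pvStepA acc p) := rfl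
lemma pvGO_cons (p : Int × String) (t : List (Int × String)) (a : Option Int) :
    pvGO (p :: t) a = pvGO t (pvStepO a p) := rfl
lemma pvGB_cons (p : Int × String) (t : List (Int × String)) (st : Option Int × Option Int) :
    pvGB (p :: t) st = pvGB t (pvStepB st p) := rfl

lemma pvGB_fst (l : List (Int × String)) : ∀ st, (pvGB l st).1 = pvGO l st.1 := by
  induction l with
  | nil => intro st; rfl
  | cons p t ih =>
      intro st
      rw [pvGB_cons, pvGO_cons, ih]
      have hstep : (pvStepB st p).1 = pvStepO st.1 p := by
        unfold pvStepB pvStepO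
        by_cases h : pvImp p.2 = true
        · rw [if_pos h, if_pos h]
        · rw [if_neg h, if_neg h]
          by_cases h2 : (pvCode p.2 && st.2 == none) = true
          · rw [if_pos h2]
          · rw [if_neg h2]
      rw [hstep]

lemma pvGA_eq (l : List (Int × String)) : ∀ a, pvGA l (pvOptInt a) = pvOptInt (pvGO l a) := by
  induction l with
  | nil => intro a; rfl
  | cons p t ih =>
      intro a
      rw [pvGA_cons, pvGO_cons]
      unfold pvStepA pvStepO
      by_cases h : pvImp p.2 = true
      · rw [if_pos h, if_pos h]; exact ih (some p.1)
      · rw [if_neg h, if_neg h]; exact ih a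

lemma pvGO_some (l : List (Int × String)) : ∀ i, pvGO l (some i) ≠ none := by
  induction l with
  | nil => intro i h; simp [pvGO] at h
  | cons p t ih =>
      intro i
      rw [pvGO_cons]
      unfold pvStepO
      by_cases h : pvImp p.2 = true
      · rw [if_pos h]; exact ih p.1
      · rw [if_neg h]; exact ih i

lemma pvGO_none_noImp (l : List (Int × String)) (h : pvGO l none = none) :
    ∀ p ∈ l, pvImp p.2 = false := by
  induction l with
  | nil => simp
  | cons p t ih =>
      rw [pvGO_cons] at h
      unfold pvStepO at h
      by_cases hp : pvImp p.2 = true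
      · rw [if_pos hp] at h; exact absurd h (pvGO_some t p.1)
      · rw [if_neg hp] at h
        intro q hq
        rcases List.mem_cons.mp hq with hq | hq
        · subst hq; exact Bool.not_eq_true _ ▸ (by simpa using hp)
        · exact ih h q hq

lemma pvGB_snd (l : List (Int × String)) :
    ∀ (a b : Option Int), (∀ p ∈ l, pvImp p.2 = false) →
      (pvGB l (a, b)).2 =
        (match b with
         | some j => some j
         | none => (l.find? (fun p => pvCode p.2)).map Prod.fst) := by
  induction l with
  | nil => intro a b _; cases b <;> rfl
  | cons p t ih =>
      intro a b hni
      have hp : pvImp p.2 = false := hni p (List.mem_cons_self ..)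
      have hni' : ∀ q ∈ t, pvImp q.2 = false := fun q hq => hni q (List.mem_cons_of_mem _ hq)
      rw [pvGB_cons]
      unfold pvStepB
      rw [if_neg (by simp [hp])]
      cases b with
      | some j =>
          rw [if_neg (by simp)]
          exact ih a (some j) hni'
      | none =>
          by_cases hc : pvCode p.2 = true
          · rw [if_pos (by simp [hc])]
            rw [ih a (some p.1) hni']
            simp [hc]
          · rw [if_neg (by simp [hc])]
            rw [ih a none hni']
            simp [hc]

lemma pvGO_enum_nonneg (lines : List String) :
    ∀ (s : Int) (a : Option Int), 0 ≤ s → (∀ j, a = some j → 0 ≤ j) →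
      ∀ i, pvGO (PySem.List.enumerate lines s) a = some i → 0 ≤ i := by
  induction lines with
  | nil =>
      intro s a _ ha i h
      simp [PySem.List.enumerate, pvGO] at h
      exact ha i h
  | cons x xs ih =>
      intro s a hs ha i h
      rw [PySem.List.enumerate_cons, pvGO_cons] at h
      refine ih (s + 1) _ (by omega) ?_ i h
      intro j hj
      unfold pvStepO at hj
      by_cases hx : pvImp x = true
      · rw [if_pos hx] at hj
        simp at hj; omega
      · rw [if_neg hx] at hj; exact ha j hj

-- ===== VERDICT (by name: the statement is the Claim_ definition above) =====
theorem find_import_insert_line_py_spec : Claim_equal_find_import_insert_line_py := by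
  intro source _
  unfold Spec_find_import_insert_line_py find_import_insert_line_py find_import_insert_line_py_alt
  show (if pvGA (PySem.List.enumerate (PySem.Str.splitlines source)) (-1) ≥ 0 then
          pvGA (PySem.List.enumerate (PySem.Str.splitlines source)) (-1) + 1
        else
          match (PySem.List.enumerate (PySem.Str.splitlines source)).find?
              (fun p => pvCode p.2) with
          | some p => p.1
          | none => 0) =
       (match pvGB (PySem.List.enumerate (PySem.Str.splitlines source)) (none, none) with
        | (some i, _) => i + 1
        | (none, some j) => j
        | (none, none) => 0)
  set l := PySem.List.enumerate (PySem.Str.splitlines source) with hl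
  have hA : pvGA l (-1) = pvOptInt (pvGO l none) := pvGA_eq l none
  have hfst : (pvGB l (none, none)).1 = pvGO l none := pvGB_fst l (none, none)
  rcases hst : pvGB l (none, none) with ⟨a, b⟩
  rw [hst] at hfst
  rcases hr : pvGO l none with _ | i
  · -- no import line found
    rw [hr] at hfst hA
    have ha : a = none := hfst
    subst ha
    have hni := pvGO_none_noImp l hr
    have hsnd := pvGB_snd l none none hni
    rw [hst] at hsnd
    rw [hA, if_neg (by norm_num [pvOptInt])]
    rcases hf : l.find? (fun p => pvCode p.2) with _ | q
    · rw [hf]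
      rw [hf] at hsnd
      simp only [Option.map_none] at hsnd
      subst hsnd; rfl
    · rw [hf]
      rw [hf] at hsnd
      simp only [Option.map_some] at hsnd
      subst hsnd; rfl
  · -- last import is line i
    rw [hr] at hfst hA
    have ha : a = some i := hfst
    subst ha
    have hi : 0 ≤ i := pvGO_enum_nonneg (PySem.Str.splitlines source) 0 none
      le_rfl (by intro j h; cases h) i (hl ▸ hr)
    rw [hA, if_pos (by simpa [pvOptInt] using hi)]
    rfl
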